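-- pv_equiv track=rewrite | github.com/vigneshsabapathi/python-algorithms | ciphers/rsa_cipher_optimized.py | get_blocks_v1
-- ===== SOURCE A (Python) =====
-- BYTE_SIZE = 256
--
-- def get_blocks_v1(message: str, block_size: int = 128) -> list[int]:
--     msg_bytes = message.encode("ascii")
--     blocks = []
--     for bs in range(0, len(msg_bytes), block_size):
--         block_int = 0
--         for i in range(bs, min(bs + block_size, len(msg_bytes))):
--             block_int += msg_bytes[i] * (BYTE_SIZE ** (i % block_size))
--         blocks.append(block_int)
--     return blocks
-- ===== SOURCE B (Python) =====
-- BYTE_SIZE = 256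
--
-- def get_blocks_v1(message: str, block_size: int = 128) -> list[int]:
--     # Count the blocks with a ceiling division, then convert each chunk at
--     # once with int.from_bytes (little-endian) instead of a per-byte loop.
--     data = message.encode("ascii")
--     nblocks = -(-len(data) // block_size)   # ceil(len/block_size); <= 0 when block_size < 0
--     return [int.from_bytes(data[k * block_size:(k + 1) * block_size], "little")
--             for k in range(nblocks)]
-- ===== Notes on version B (the rewrite author's own statement) =====
-- stated objective: faster
-- what changed: Instead of stepping over byte offsets and accumulating each byte times a freshly computed power 256**(i % block_size), B counts blocks by a ceiling division and converts each chunk with one C-level int.from_bytes(chunk, 'little') call.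
import Mathlib
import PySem

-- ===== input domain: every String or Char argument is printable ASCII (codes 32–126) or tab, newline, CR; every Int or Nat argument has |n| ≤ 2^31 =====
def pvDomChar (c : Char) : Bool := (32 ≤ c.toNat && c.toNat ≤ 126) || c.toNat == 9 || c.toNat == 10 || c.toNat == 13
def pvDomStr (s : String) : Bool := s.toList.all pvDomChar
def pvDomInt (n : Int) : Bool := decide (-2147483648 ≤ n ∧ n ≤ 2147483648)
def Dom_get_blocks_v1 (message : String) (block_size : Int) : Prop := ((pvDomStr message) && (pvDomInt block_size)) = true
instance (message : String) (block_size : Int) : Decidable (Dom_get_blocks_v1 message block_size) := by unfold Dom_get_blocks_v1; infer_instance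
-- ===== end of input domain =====

-- B counts the blocks once by a ceiling division and converts each chunk with a single
-- little-endian conversion (int.from_bytes), instead of A's per-byte loop that recomputes
-- 256**(i % block_size) for every byte; objective: faster.

-- ===== PORT A =====
def get_blocks_v1 (message : String) (block_size : Int) : List Int :=
  -- message.encode("ascii"): the list of byte values (exact on the ASCII domain)
  let msg_bytes : List Int := message.toList.map (fun c => (c.toNat : Int))
  (PySem.List.pyRange 0 (msg_bytes.length : Int) block_size).foldl
    (fun blocks bs =>
      blocks ++
        [(PySem.List.pyRange bs (min (bs + block_size) (msg_bytes.length : Int)) 1).foldl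
          (fun block_int i =>
            block_int + PySem.List.pyGetD msg_bytes i 0 * (256 : Int) ^ (PySem.Int.mod i block_size).toNat)
          0])
    []

-- ===== PORT B =====
def get_blocks_v1_alt (message : String) (block_size : Int) : List Int :=
  let data : List Int := message.toList.map (fun c => (c.toNat : Int))
  -- -(-len(data) // block_size): ceiling division (≤ 0 when block_size < 0)
  let nblocks : Int := -(PySem.Int.floordiv (-(data.length : Int)) block_size)
  (PySem.List.pyRange 0 nblocks 1).map
    (fun k =>
      -- int.from_bytes(chunk, "little"): little-endian value of the chunk (exact)
      (PySem.List.slice data (some (k * block_size)) (some ((k + 1) * block_size))).foldr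
        (fun b acc => acc * 256 + b) 0)

-- ===== PRECONDITION & SPEC =====
-- Pre_ excludes only block_size = 0, on which A raises ValueError (range step 0) and B raises ZeroDivisionError.
def Pre_get_blocks_v1 (message : String) (block_size : Int) : Prop := block_size ≠ 0
instance (message : String) (block_size : Int) : Decidable (Pre_get_blocks_v1 message block_size) := by unfold Pre_get_blocks_v1; infer_instance
def pvWitness_get_blocks_v1 : String × Int := ("AB", 1)
def Spec_get_blocks_v1 (message : String) (block_size : Int) (out : List Int) : Prop := out = get_blocks_v1_alt message block_size
instance (message : String) (block_size : Int) (out : List Int) : Decidable (Spec_get_blocks_v1 message block_size out) := by unfold Spec_get_blocks_v1; infer_instance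

-- ===== CLAIM (what is proved, stated in full; the proofs are below) =====
def Claim_equal_get_blocks_v1 : Prop := ∀ (message : String) (block_size : Int), Dom_get_blocks_v1 message block_size → Pre_get_blocks_v1 message block_size → Spec_get_blocks_v1 message block_size (get_blocks_v1 message block_size)

-- ===== LEMMAS AND PROOFS =====

-- range(a, b, s) with negative step and a ≤ b is empty
lemma pyRange_neg_le_nil (a b s : Int) (hs : s < 0) (hab : a ≤ b) :
    PySem.List.pyRange a b s = [] := by
  unfold PySem.List.pyRange
  rw [if_neg (by omega)]
  simp only [if_neg (by omega : ¬ 0 < s), if_neg (by omega : ¬ b < a), List.range_zero,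
    List.map_nil]

-- the index-loop sum of L[k] * 256^(k+p) is 256^p times the little-endian fold of L
lemma horner_foldl (L : List Int) : ∀ (p : Nat) (acc : Int),
    (List.range L.length).foldl (fun a k => a + L.getD k 0 * (256 : Int) ^ (k + p)) acc
      = acc + (256 : Int) ^ p * L.foldr (fun b acc => acc * 256 + b) 0 := by
  induction L with
  | nil => intro p acc; simp
  | cons b t ih =>
    intro p acc
    rw [List.length_cons, List.range_succ_eq_map, List.foldl_cons, List.foldl_map]
    have hcongr :
        (List.range t.length).foldl
            (fun a k => a + (b :: t).getD (k + 1) 0 * (256 : Int) ^ (k + 1 + p))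
            (acc + (b :: t).getD 0 0 * (256 : Int) ^ (0 + p))
          = (List.range t.length).foldl
            (fun a k => a + t.getD k 0 * (256 : Int) ^ (k + (p + 1)))
            (acc + (b :: t).getD 0 0 * (256 : Int) ^ (0 + p)) := by
      apply PySem.List.foldl_congr_mem
      intro a k _
      have : k + 1 + p = k + (p + 1) := by omega
      rw [List.getD_cons_succ, this]
    simp only [Nat.succ_eq_add_one] at hcongr ⊢
    rw [hcongr, ih (p + 1)]
    simp only [List.getD_cons_zero, List.foldr_cons, Nat.zero_add]
    ring

-- one block: A's inner loop over indices bs..min(bs+B, n)-1 equals the little-endian fold of the slice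
lemma inner_block (data : List Int) (bs B : Int) (hB : 0 < B) (h0 : 0 ≤ bs)
    (h1 : bs < (data.length : Int)) (hdvd : B ∣ bs) :
    (PySem.List.pyRange bs (min (bs + B) (data.length : Int)) 1).foldl
        (fun acc i => acc + PySem.List.pyGetD data i 0 * (256 : Int) ^ (PySem.Int.mod i B).toNat) 0
      = (PySem.List.slice data (some bs) (some (bs + B))).foldr (fun b acc => acc * 256 + b) 0 := by
  rw [PySem.List.slice_toNat data h0 (by omega)]
  rw [PySem.List.pyRange_one, List.foldl_map]
  set L := List.take ((bs + B).toNat - bs.toNat) (List.drop bs.toNat data) with hL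
  have hlenL : L.length = (min (bs + B) (data.length : Int) - bs).toNat := by
    rw [hL, List.length_take, List.length_drop]; omega
  rw [show (min (bs + B) (data.length : Int) - bs).toNat = L.length from hlenL.symm]
  have hstep : (List.range L.length).foldl
      (fun (acc : Int) (k : Nat) => acc + PySem.List.pyGetD data (bs + (k : Int)) 0 *
        (256 : Int) ^ (PySem.Int.mod (bs + (k : Int)) B).toNat) 0
      = (List.range L.length).foldl
      (fun (acc : Int) (k : Nat) => acc + L.getD k 0 * (256 : Int) ^ (k + 0)) 0 := by
    apply PySem.List.foldl_congr_mem
    intro acc k hk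
    rw [List.mem_range] at hk
    have hkB : (k : Int) < B := by omega
    have hkn : bs + (k : Int) < (data.length : Int) := by omega
    obtain ⟨q, hq⟩ := hdvd
    have hmod : PySem.Int.mod (bs + (k : Int)) B = (k : Int) := by
      rw [PySem.Int.mod_eq_emod_of_pos hB, hq]
      rw [show B * q + (k : Int) = (k : Int) + B * q by ring, Int.add_mul_emod_self_left]
      exact Int.emod_eq_of_lt (by omega) hkB
    have hget : PySem.List.pyGetD data (bs + (k : Int)) 0 = L.getD k 0 := by
      have hkL : k < L.length := hk
      rw [PySem.List.pyGetD_eq_getElem data 0 (by omega) hkn,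
        List.getD_eq_getElem L 0 hkL]
      have hidx : (bs + (k : Int)).toNat = bs.toNat + k := by omega
      simp only [hL, List.getElem_take, List.getElem_drop, hidx]
    rw [hmod, hget]
    norm_num
  rw [hstep, horner_foldl L 0 0]
  norm_num

-- the ceiling division -(-n // B), for 0 < B and 0 ≤ n
lemma nblocks_eq (n B : Int) (hB : 0 < B) (hn : 0 ≤ n) :
    -(PySem.Int.floordiv (-n) B) = if 0 < n then (n + B - 1) / B else 0 := by
  by_cases hpos : 0 < n
  · rw [if_pos hpos]
    rw [PySem.Int.neg_floordiv_neg_eq_iff_of_pos hB]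
    have h1 := Int.ediv_add_emod (n + B - 1) B
    have h2 := Int.emod_nonneg (n + B - 1) (by omega : B ≠ 0)
    have h3 := Int.emod_lt_of_pos (n + B - 1) hB
    constructor
    · nlinarith [h1, h2, h3]
    · nlinarith [h1, h2, h3]
  · rw [if_neg hpos]
    have hn0 : n = 0 := by omega
    subst hn0
    simp [PySem.Int.floordiv_eq_ediv_of_pos hB]

-- ===== VERDICT (by name: the statement is the Claim_ definition above) =====
theorem get_blocks_v1_spec : Claim_equal_get_blocks_v1 := by
  intro message block_size _hdom hpre
  unfold Spec_get_blocks_v1 get_blocks_v1 get_blocks_v1_alt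
  simp only []
  set data : List Int := message.toList.map (fun c => (c.toNat : Int)) with hdata
  have hn0 : (0 : Int) ≤ (data.length : Int) := by positivity
  rcases lt_trichotomy block_size 0 with hB | hB | hB
  · -- negative step: A's range is empty, and nblocks ≤ 0 so B's range is empty too
    rw [pyRange_neg_le_nil _ _ _ hB hn0]
    have hfd : PySem.Int.floordiv (-(data.length : Int)) block_size
        = PySem.Int.floordiv (data.length : Int) (-block_size) := by
      rw [← PySem.Int.floordiv_neg_neg (data.length : Int) (-block_size), neg_neg]
    have hq : 0 ≤ PySem.Int.floordiv (data.length : Int) (-block_size) := by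
      rw [PySem.Int.floordiv_eq_ediv_of_pos (by omega)]
      exact Int.ediv_nonneg hn0 (by omega)
    rw [PySem.List.pyRange_one_eq_nil
      (by omega : -(PySem.Int.floordiv (-(data.length : Int)) block_size) ≤ 0)]
    rfl
  · exact absurd hB hpre
  · -- positive step
    rw [PySem.List.foldl_append_singleton_eq_map, List.nil_append]
    rw [PySem.List.pyRange_of_pos 0 (data.length : Int) hB, List.map_map]
    rw [nblocks_eq (data.length : Int) block_size hB hn0, PySem.List.pyRange_one, List.map_map]
    have hlen : (if (0 : Int) < (data.length : Int)
          then (((data.length : Int) - 0 + block_size - 1) / block_size).toNat else 0)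
        = ((if (0 : Int) < (data.length : Int)
          then ((data.length : Int) + block_size - 1) / block_size else 0) - 0).toNat := by
      by_cases hpos : (0 : Int) < (data.length : Int)
      · rw [if_pos hpos, if_pos hpos, sub_zero, sub_zero]
      · rw [if_neg hpos, if_neg hpos]; rfl
    rw [hlen]
    apply List.map_congr_left
    intro k hk
    rw [List.mem_range] at hk
    -- bounds on the block start bs = block_size * k
    have hbslt : block_size * (k : Int) < (data.length : Int) := by
      by_cases hpos : (0 : Int) < (data.length : Int)
      · rw [if_pos hpos, sub_zero] at hk
        have hq := Int.ediv_add_emod ((data.length : Int) + block_size - 1) block_size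
        have hq2 := Int.emod_nonneg ((data.length : Int) + block_size - 1)
          (by omega : block_size ≠ 0)
        have hq3 := Int.emod_lt_of_pos ((data.length : Int) + block_size - 1) hB
        have hkq : (k : Int) < ((data.length : Int) + block_size - 1) / block_size := by omega
        nlinarith [hq, hq2, hq3, hkq]
      · rw [if_neg hpos] at hk; omega
    have h0bs : (0 : Int) ≤ block_size * (k : Int) := by positivity
    simp only [Function.comp_apply, zero_add]
    rw [inner_block data (block_size * (k : Int)) block_size hB h0bs hbslt ⟨(k : Int), rfl⟩]
    rw [show (k : Int) * block_size = block_size * (k : Int) from mul_comm _ _,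
      show ((k : Int) + 1) * block_size = block_size * (k : Int) + block_size by ring]
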